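-- pv_equiv track=rewrite | github.com/bmm333/Python | 5_Esercizi_SeqCompr.py | areEq
-- ===== SOURCE A (Python) =====
-- def areEq(exp,base,limit):
--     if exp<0 or base<0:
--         return False
--     if base==0:
--         return (exp==0 and limit==1)
--     if base==1:
--         return limit==(exp+1)
--     somma=0
--     for i in range(exp+1):
--         somma+=base**i
--     return somma==limit
-- ===== SOURCE B (Python) =====
-- def areEq(exp, base, limit):
--     # closed-form geometric series with fast (square-and-multiply) exponentiation
--     if exp < 0 or base < 0:
--         return False
--     if base == 0:
--         return exp == 0 and limit == 1
--     if base == 1: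
--         return limit == exp + 1
--     # sum_{i=0}^{exp} base**i = (base**(exp+1) - 1) // (base - 1)
--     e = exp + 1
--     b = base
--     result = 1
--     while e > 0:
--         if e & 1:
--             result *= b
--         b *= b
--         e >>= 1
--     return (result - 1) // (base - 1) == limit
-- ===== Notes on version B (the rewrite author's own statement) =====
-- stated objective: faster
-- what changed: Replaced the O(exp) loop summing base**i (each an O(i)-multiplication power) with the closed-form geometric sum (base**(exp+1)-1)//(base-1) computed by square-and-multiply exponentiation.
import Mathlib
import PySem

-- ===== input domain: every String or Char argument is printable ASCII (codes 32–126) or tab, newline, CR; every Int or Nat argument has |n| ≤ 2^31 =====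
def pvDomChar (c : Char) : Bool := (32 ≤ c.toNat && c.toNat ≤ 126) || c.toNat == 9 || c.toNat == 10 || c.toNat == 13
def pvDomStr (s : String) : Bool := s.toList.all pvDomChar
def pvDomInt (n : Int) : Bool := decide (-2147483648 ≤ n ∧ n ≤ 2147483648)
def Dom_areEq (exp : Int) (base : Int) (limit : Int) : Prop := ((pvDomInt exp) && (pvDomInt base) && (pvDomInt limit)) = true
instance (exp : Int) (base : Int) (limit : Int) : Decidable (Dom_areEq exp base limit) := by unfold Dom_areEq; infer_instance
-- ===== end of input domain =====

-- B replaces A's O(exp) power-summing loop by the closed-form geometric sum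
-- (base^(exp+1)-1)//(base-1) computed with square-and-multiply exponentiation (faster).

-- ===== PORT A =====
def areEq (exp : Int) (base : Int) (limit : Int) : Bool :=
  if exp < 0 || base < 0 then false
  else if base == 0 then decide (exp = 0) && decide (limit = 1)
  else if base == 1 then decide (limit = exp + 1)
  else
    -- somma = 0; for i in range(exp+1): somma += base**i
    let somma := (PySem.List.pyRange 0 (exp + 1) 1).foldl (fun s i => s + base ^ i.toNat) 0
    decide (somma = limit)

-- ===== PORT B =====
-- while e > 0: if e & 1: result *= b; b *= b; e >>= 1   (e is nonnegative, kept as a Nat)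
def fastPowLoop (b : Int) (e : Nat) (result : Int) : Int :=
  if e = 0 then result
  else fastPowLoop (b * b) (e / 2) (if e % 2 = 1 then result * b else result)

def areEq_alt (exp : Int) (base : Int) (limit : Int) : Bool :=
  if exp < 0 || base < 0 then false
  else if base == 0 then decide (exp = 0) && decide (limit = 1)
  else if base == 1 then decide (limit = exp + 1)
  else
    let result := fastPowLoop base (exp + 1).toNat 1
    decide (PySem.Int.floordiv (result - 1) (base - 1) = limit)

-- ===== PRECONDITION & SPEC =====
def Spec_areEq (exp : Int) (base : Int) (limit : Int) (out : Bool) : Prop := out = areEq_alt exp base limit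
instance (exp : Int) (base : Int) (limit : Int) (out : Bool) : Decidable (Spec_areEq exp base limit out) := by unfold Spec_areEq; infer_instance

-- ===== CLAIM (what is proved, stated in full; the proofs are below) =====
def Claim_equal_areEq : Prop := ∀ (exp : Int) (base : Int) (limit : Int), Dom_areEq exp base limit → Spec_areEq exp base limit (areEq exp base limit)

-- ===== LEMMAS AND PROOFS =====

theorem fastPowLoop_eq (e : Nat) : ∀ (b result : Int), fastPowLoop b e result = result * b ^ e := by
  induction e using Nat.strong_induction_on with
  | _ e ih =>
    intro b result
    unfold fastPowLoop
    by_cases h : e = 0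
    · simp [h]
    · rw [if_neg h, ih (e / 2) (Nat.div_lt_self (Nat.pos_of_ne_zero h) one_lt_two)]
      have he : e = 2 * (e / 2) + e % 2 := (Nat.div_add_mod e 2).symm
      have hm : e % 2 = 0 ∨ e % 2 = 1 := Nat.mod_two_eq_zero_or_one e
      have hb : b * b = b ^ 2 := (sq b).symm
      rcases hm with hm | hm
      · rw [if_neg (by omega), hb, ← pow_mul, show 2 * (e / 2) = e from by omega]
      · rw [if_pos hm, hb, ← pow_mul]
        have hpow : b ^ e = b ^ (2 * (e / 2)) * b := by
          rw [← pow_succ]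
          congr 1
          omega
        rw [hpow]
        ring

theorem foldl_geo (base : Int) (n : Nat) :
    (PySem.List.pyRange 0 ((n : Int) + 1) 1).foldl (fun s i => s + base ^ i.toNat) 0
      = ∑ i ∈ Finset.range (n + 1), base ^ i := by
  induction n with
  | zero =>
    rw [show ((0 : Nat) : Int) + 1 = 0 + 1 by norm_num, PySem.List.pyRange_one_singleton 0]
    simp
  | succ n ih =>
    rw [show ((n + 1 : Nat) : Int) + 1 = ((n : Int) + 1) + 1 by push_cast; ring,
        PySem.List.pyRange_one_succ_right (by positivity), List.foldl_append, ih]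
    simp only [List.foldl_cons, List.foldl_nil]
    rw [show ((n : Int) + 1).toNat = n + 1 by omega, Finset.sum_range_succ _ (n + 1)]

theorem areEq_eq_alt (exp base limit : Int) : areEq exp base limit = areEq_alt exp base limit := by
  unfold areEq areEq_alt
  by_cases h1 : exp < 0 || base < 0
  · simp [h1]
  · rw [if_neg h1, if_neg h1]
    by_cases h2 : base == 0
    · simp [h2]
    · rw [if_neg h2, if_neg h2]
      by_cases h3 : base == 1
      · simp [h3]
      · rw [if_neg h3, if_neg h3]
        -- now exp ≥ 0, base ≥ 2
        have hexp : 0 ≤ exp := by simp at h1; omega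
        have hbase : 2 ≤ base := by simp at h1 h2 h3; omega
        set n := exp.toNat with hn
        have hcast : exp = (n : Int) := by omega
        rw [hcast, show ((n : Int) + 1).toNat = n + 1 by omega,
            fastPowLoop_eq, foldl_geo, one_mul]
        have hgeom : (∑ i ∈ Finset.range (n + 1), base ^ i) * (base - 1) = base ^ (n + 1) - 1 :=
          geom_sum_mul base (n + 1)
        have hdiv : PySem.Int.floordiv (base ^ (n + 1) - 1) (base - 1)
            = ∑ i ∈ Finset.range (n + 1), base ^ i := by
          rw [PySem.Int.floordiv_eq_ediv_of_pos (by omega), ← hgeom,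
              Int.mul_ediv_cancel _ (by omega)]
        show (decide ((∑ i ∈ Finset.range (n + 1), base ^ i) = limit))
            = (decide (PySem.Int.floordiv (base ^ (n + 1) - 1) (base - 1) = limit))
        rw [hdiv]

-- ===== VERDICT (by name: the statement is the Claim_ definition above) =====
theorem areEq_spec : Claim_equal_areEq := by
  intro exp base limit _
  unfold Spec_areEq
  exact areEq_eq_alt exp base limit
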